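-- pv_equiv track=rewrite | github.com/iWilli26/AoC2023 | day2/challenge2.py | cubesToDict
-- ===== SOURCE A (Python) =====
-- def cubesToDict(cubes):
--     dict = {}
--     for i in range(len(cubes)):
--         if i%2==0:
--             number = int(cubes[i])
--         else:
--             dict[cubes[i]]=number
--     return dict
-- ===== SOURCE B (Python) =====
-- def cubesToDict(cubes):
--     d = {}
--     it = iter(cubes)
--     for count, color in zip(it, it):
--         d[color] = int(count)
--     return d
-- ===== Notes on version B (the rewrite author's own statement) =====
-- stated objective: idiomatic
-- what changed: Replaces the index loop with a parity test and a carried `number` variable by direct iteration over (count, color) pairs via zip on one iterator, producing each dict entry from a single pair with no cross-iteration state.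
import Mathlib
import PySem

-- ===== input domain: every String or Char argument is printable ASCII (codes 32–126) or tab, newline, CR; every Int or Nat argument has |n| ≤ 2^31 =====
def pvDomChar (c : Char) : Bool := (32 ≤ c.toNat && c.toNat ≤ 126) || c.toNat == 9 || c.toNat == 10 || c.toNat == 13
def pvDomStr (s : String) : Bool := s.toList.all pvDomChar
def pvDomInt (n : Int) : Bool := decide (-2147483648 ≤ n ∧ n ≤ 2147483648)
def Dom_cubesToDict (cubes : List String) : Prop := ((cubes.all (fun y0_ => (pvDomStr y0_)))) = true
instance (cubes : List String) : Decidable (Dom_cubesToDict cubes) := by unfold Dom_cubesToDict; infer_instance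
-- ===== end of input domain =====

-- B replaces A's parity-tested index loop with carried state by direct iteration over (count, color) pairs (idiomatic; same cost).

-- ===== PORT A =====
-- for i in range(len(cubes)): even i parses number, odd i stores it; state = (dict, number)
def cubesToDict (cubes : List String) : List (String × Int) :=
  (((PySem.List.pyRange 0 (cubes.length : Int) 1).foldl
    (fun (st : PySem.Dict String Int × Int) i =>
      if PySem.Int.mod i 2 = 0 then
        (st.1, (PySem.Int.ofStr? (PySem.List.pyGetD cubes i "")).getD 0)
      else
        (st.1.insert (PySem.List.pyGetD cubes i "") st.2, st.2))
    (PySem.Dict.empty, 0)).1).items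

-- ===== PORT B =====
-- for count, color in zip(it, it): d[color] = int(count)  — consumes the list two at a time
def cubesToDictAltLoop (d : PySem.Dict String Int) : List String → PySem.Dict String Int
  | count :: color :: rest =>
      cubesToDictAltLoop (d.insert color ((PySem.Int.ofStr? count).getD 0)) rest
  | _ => d

def cubesToDict_alt (cubes : List String) : List (String × Int) :=
  (cubesToDictAltLoop PySem.Dict.empty cubes).items

-- ===== PRECONDITION & SPEC =====
-- Pre_: exactly where Python A returns — every even-index element is a valid int literal (int() raises ValueError otherwise).
def Pre_cubesToDict (cubes : List String) : Prop :=
  ((List.range cubes.length).all fun i =>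
    (i % 2 == 1) || (PySem.Int.ofStr? (cubes.getD i "")).isSome) = true
instance (cubes : List String) : Decidable (Pre_cubesToDict cubes) := by
  unfold Pre_cubesToDict; infer_instance

def pvWitness_cubesToDict : List String := ["3", "blue", "4", "red"]

def Spec_cubesToDict (cubes : List String) (out : List (String × Int)) : Prop := out = cubesToDict_alt cubes
instance (cubes : List String) (out : List (String × Int)) : Decidable (Spec_cubesToDict cubes out) := by unfold Spec_cubesToDict; infer_instance

-- ===== CLAIM (what is proved, stated in full; the proofs are below) =====
def Claim_equal_cubesToDict : Prop := ∀ (cubes : List String), Dom_cubesToDict cubes → Pre_cubesToDict cubes → Spec_cubesToDict cubes (cubesToDict cubes)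

-- ===== LEMMAS AND PROOFS =====

-- A's loop from an even index k onward, acting on the suffix cubes.drop k, builds the same dict as B's pair recursion.
theorem cubesToDict_fold_eq (cubes ys : List String) (k : Nat) (d : PySem.Dict String Int) (n : Int)
    (h : cubes.drop k = ys) (hk : k % 2 = 0) :
    ((PySem.List.pyRange (k : Int) (cubes.length : Int) 1).foldl
      (fun (st : PySem.Dict String Int × Int) i =>
        if PySem.Int.mod i 2 = 0 then
          (st.1, (PySem.Int.ofStr? (PySem.List.pyGetD cubes i "")).getD 0)
        else
          (st.1.insert (PySem.List.pyGetD cubes i "") st.2, st.2))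
      (d, n)).1 = cubesToDictAltLoop d ys := by
  match ys with
  | [] =>
      have hlen : cubes.length ≤ k := List.drop_eq_nil_iff.mp h
      rw [PySem.List.pyRange_one_eq_nil (by exact_mod_cast hlen)]
      simp [cubesToDictAltLoop]
  | [c] =>
      have hlen : cubes.length = k + 1 := by
        have h1 := congrArg List.length h
        simp [List.length_drop] at h1
        omega
      rw [hlen]
      rw [PySem.List.pyRange_one_cons (by omega)]
      rw [PySem.List.pyRange_one_eq_nil (by omega)]
      simp only [List.foldl_cons, List.foldl_nil]
      have hmod : PySem.Int.mod (k : Int) 2 = 0 := by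
        simpa [hk] using PySem.Int.mod_natCast k 2
      rw [if_pos hmod]
      simp [cubesToDictAltLoop]
  | c :: m :: rest =>
      have hlen : rest.length + 2 + k = cubes.length := by
        have h1 := congrArg List.length h
        simp [List.length_drop] at h1
        have hk' : k ≤ cubes.length := by
          by_contra hkk
          rw [List.drop_eq_nil_of_le (by omega)] at h
          exact (List.cons_ne_nil _ _) h.symm
        omega
      have hc : cubes[k]? = some c := by
        have h0 := congrArg (fun t => t[0]?) h
        simpa [List.getElem?_drop] using h0
      have hm : cubes[k + 1]? = some m := by
        have h0 := congrArg (fun t => t[1]?) h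
        simpa [List.getElem?_drop] using h0
      have hrest : cubes.drop (k + 2) = rest := by
        have h0 := congrArg (List.drop 2) h
        simpa [List.drop_drop, Nat.add_comm] using h0
      rw [PySem.List.pyRange_one_cons (by omega)]
      rw [PySem.List.pyRange_one_cons (by omega)]
      simp only [List.foldl_cons]
      have hmod : PySem.Int.mod (k : Int) 2 = 0 := by
        simpa [hk] using PySem.Int.mod_natCast k 2
      have hmod1 : PySem.Int.mod ((k : Int) + 1) 2 = 1 := by
        have h2' : (k + 1) % 2 = 1 := by omega
        simpa [h2'] using PySem.Int.mod_natCast (k + 1) 2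
      have hgc : PySem.List.pyGetD cubes (k : Int) "" = c := by
        rw [PySem.List.pyGetD_natCast]
        simp [List.getD, hc]
      have hgm : PySem.List.pyGetD cubes ((k : Int) + 1) "" = m := by
        have : ((k : Int) + 1) = ((k + 1 : Nat) : Int) := by push_cast; ring
        rw [this, PySem.List.pyGetD_natCast]
        simp [List.getD, hm]
      rw [if_pos hmod, hgc]
      rw [if_neg (by rw [hmod1]; norm_num), hgm]
      rw [show ((k : Int) + 1 + 1) = ((k + 2 : Nat) : Int) by push_cast; ring]
      rw [cubesToDict_fold_eq cubes rest (k + 2) _ _ hrest (by omega)]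
      simp [cubesToDictAltLoop]
termination_by ys.length

-- ===== VERDICT (by name: the statement is the Claim_ definition above) =====
theorem cubesToDict_spec : Claim_equal_cubesToDict := by
  intro cubes _ _
  unfold Spec_cubesToDict cubesToDict cubesToDict_alt
  exact congrArg (fun d => d.items)
    (cubesToDict_fold_eq cubes cubes 0 PySem.Dict.empty 0 (by simp) (by omega))
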